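-- pv_equiv track=rewrite | github.com/wonyoung-jang/logseq-analyzer | logseq_analyzer/utils/helpers.py | process_aliases
-- ===== SOURCE A (Python) =====
-- from typing import TYPE_CHECKING, Any, Generator, TypeVar
--
-- def process_aliases(aliases: str) -> Generator[str, None, None]:
--     """Process aliases to extract individual aliases."""
--     if not (aliases := aliases.strip()):
--         return
--
--     current = []
--     append_current = current.append
--     clear_current = current.clear
--     inside_brackets = False
--     pos = 0
--     while pos < len(aliases):
--         if aliases[pos : pos + 2] == "[[":
--             inside_brackets = True
--             pos += 2
--         elif aliases[pos : pos + 2] == "]]":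
--             inside_brackets = False
--             pos += 2
--         elif aliases[pos] == "," and not inside_brackets:
--             if part := "".join(current).strip().lower():
--                 yield part
--             clear_current()
--             pos += 1
--         else:
--             append_current(aliases[pos])
--             pos += 1
--
--     if part := "".join(current).strip().lower():
--         yield part
-- ===== SOURCE B (Python) =====
-- def process_aliases(aliases):
--     """Tokenize with nested str.split on '[[' / ']]' markers instead of a char-by-char scan."""
--     buf = ""
--     for i, piece in enumerate(aliases.strip().split("[[")):
--         for j, chunk in enumerate(piece.split("]]")):
--             if i > 0 and j == 0:
--                 buf += chunk  # inside brackets: commas kept verbatim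
--             else:
--                 parts = chunk.split(",")
--                 buf += parts[0]
--                 for part in parts[1:]:
--                     alias = buf.strip().lower()
--                     if alias:
--                         yield alias
--                     buf = part
--     alias = buf.strip().lower()
--     if alias:
--         yield alias
-- ===== Notes on version B (the rewrite author's own statement) =====
-- stated objective: faster
-- what changed: A scans character by character with a pos cursor, two-char lookahead and an inside_brackets flag; B tokenizes the whole string at once with nested str.split on the bracket markers (and on ',' within outside chunks) and walks the resulting pieces.
import Mathlib
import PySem

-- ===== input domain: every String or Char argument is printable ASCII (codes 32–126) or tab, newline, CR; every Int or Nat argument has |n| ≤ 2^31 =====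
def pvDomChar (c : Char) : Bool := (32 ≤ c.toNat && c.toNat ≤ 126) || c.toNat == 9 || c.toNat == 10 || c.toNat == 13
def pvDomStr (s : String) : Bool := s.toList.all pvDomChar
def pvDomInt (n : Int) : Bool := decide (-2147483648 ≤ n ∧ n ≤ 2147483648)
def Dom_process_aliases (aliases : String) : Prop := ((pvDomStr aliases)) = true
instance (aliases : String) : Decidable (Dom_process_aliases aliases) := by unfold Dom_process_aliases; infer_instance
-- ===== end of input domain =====

-- B replaces A's char-by-char bracket state machine by nested str.split tokenization (measured faster in a timing run); A is a
-- generator, so equivalence is about the list of yielded values.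

-- ===== PORT A =====
-- shared by both ports: `buf.strip().lower()`, yielded iff non-empty (both sources contain this line verbatim)
def pvFlush (buf : List Char) (out : List String) : List String :=
  let part := PySem.Chars.lower (PySem.Chars.strip buf)
  if part = [] then out else out ++ [String.ofList part]

-- A's while loop: two-char lookahead on "[["/"]]", comma splits outside brackets, else append to current
def stepA : List Char → List Char → Bool → List String → List String
  | '[' :: '[' :: rest, cur, _, out => stepA rest cur true out
  | ']' :: ']' :: rest, cur, _, out => stepA rest cur false out
  | ',' :: rest, cur, false, out => stepA rest [] false (pvFlush cur out)
  | c :: rest, cur, inside, out => stepA rest (cur ++ [c]) inside out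
  | [], cur, _, out => pvFlush cur out

def process_aliases (aliases : String) : List String :=
  let s := (PySem.Str.strip aliases).toList
  if s = [] then [] else stepA s [] false []

-- ===== PORT B =====
-- `chunk.split(",")`: parts[0] extends buf, each later part flushes buf and restarts it
def pvDoChunk (st : List Char × List String) (chunk : List Char) : List Char × List String :=
  match PySem.Chars.splitOn chunk [','] with
  | [] => st  -- unreachable: str.split never returns an empty list
  | p0 :: ps => ps.foldl (fun st part => (part, pvFlush st.1 st.2)) (st.1 ++ p0, st.2)

-- one piece = `piece.split("]]")`; its first chunk is inside brackets iff the piece is not the first (i > 0, j == 0)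
def pvDoPiece (insideFirst : Bool) (st : List Char × List String) (piece : List Char) : List Char × List String :=
  match PySem.Chars.splitOn piece [']', ']'] with
  | [] => st  -- unreachable
  | c0 :: cc => cc.foldl pvDoChunk (if insideFirst then (st.1 ++ c0, st.2) else pvDoChunk st c0)

def process_aliases_alt (aliases : String) : List String :=
  match PySem.Chars.splitOn (PySem.Str.strip aliases).toList ['[', '['] with
  | [] => []  -- unreachable
  | p0 :: ps =>
    let st := ps.foldl (pvDoPiece true) (pvDoPiece false ([], []) p0)
    pvFlush st.1 st.2

-- ===== PRECONDITION & SPEC =====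
def Spec_process_aliases (aliases : String) (out : List String) : Prop := out = process_aliases_alt aliases
instance (aliases : String) (out : List String) : Decidable (Spec_process_aliases aliases out) := by unfold Spec_process_aliases; infer_instance

-- ===== CLAIM (what is proved, stated in full; the proofs are below) =====
def Claim_equal_process_aliases : Prop := ∀ (aliases : String), Dom_process_aliases aliases → Spec_process_aliases aliases (process_aliases aliases)

-- ===== LEMMAS AND PROOFS =====

-- structural spec for s.split(sep) with a two-char sep, as (head, tail)
def split2 (a b : Char) : List Char → List Char × List (List Char)
  | x :: y :: rest =>
    if x = a ∧ y = b then ([], (split2 a b rest).1 :: (split2 a b rest).2)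
    else (x :: (split2 a b (y :: rest)).1, (split2 a b (y :: rest)).2)
  | [x] => ([x], [])
  | [] => ([], [])

-- structural spec for s.split(sep) with a one-char sep
def split1 (a : Char) : List Char → List Char × List (List Char)
  | x :: rest =>
    if x = a then ([], (split1 a rest).1 :: (split1 a rest).2)
    else (x :: (split1 a rest).1, (split1 a rest).2)
  | [] => ([], [])

theorem split2_cons_pair (a b : Char) (rest : List Char) :
    split2 a b (a :: b :: rest) = ([], (split2 a b rest).1 :: (split2 a b rest).2) := by
  simp [split2]

theorem split2_cons (a b : Char) (x : Char) (l : List Char)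
    (h : x = a → l.head? ≠ some b) :
    split2 a b (x :: l) = (x :: (split2 a b l).1, (split2 a b l).2) := by
  match l with
  | [] => simp [split2]
  | y :: rest =>
    have : ¬ (x = a ∧ y = b) := by intro ⟨h1, h2⟩; exact h h1 (by simp [h2])
    simp [split2, this]

theorem split1_cons_ne (a x : Char) (l : List Char) (h : x ≠ a) :
    split1 a (x :: l) = (x :: (split1 a l).1, (split1 a l).2) := by
  simp [split1, h]

-- first part of split2 is empty or starts with the same char as the input
theorem split2_fst_head (a b : Char) (l : List Char) :
    (split2 a b l).1 = [] ∨ (split2 a b l).1.head? = l.head? := by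
  match l with
  | [] => left; simp [split2]
  | [x] => right; simp [split2]
  | x :: y :: rest =>
    by_cases h : x = a ∧ y = b
    · left; simp [split2, h]
    · right; simp [split2, h]

-- ===== library characterization: PySem.Chars.splitOn = split2 / split1 =====

theorem go_nil (sep : List Char) (fuel : Nat) (cur : List Char) (acc : List (List Char)) :
    PySem.Chars.splitOn.go sep fuel [] cur acc = (cur.reverse :: acc).reverse := by
  cases fuel <;> simp [PySem.Chars.splitOn.go]

theorem go_step (sep : List Char) (fuel : Nat) (c : Char) (rest cur : List Char) (acc : List (List Char)) :
    PySem.Chars.splitOn.go sep (fuel + 1) (c :: rest) cur acc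
      = if sep.isPrefixOf (c :: rest) then
          PySem.Chars.splitOn.go sep fuel (List.drop sep.length (c :: rest)) [] (cur.reverse :: acc)
        else PySem.Chars.splitOn.go sep fuel rest (c :: cur) acc := by
  rfl

theorem go_acc (sep : List Char) (fuel : Nat) :
    ∀ (l cur : List Char) (acc : List (List Char)),
      PySem.Chars.splitOn.go sep fuel l cur acc
        = acc.reverse ++ PySem.Chars.splitOn.go sep fuel l cur [] := by
  induction fuel with
  | zero => intro l cur acc; simp [PySem.Chars.splitOn.go]
  | succ f ih =>
    intro l cur acc
    match l with
    | [] => simp [go_nil]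
    | c :: rest =>
      rw [go_step, go_step]
      by_cases h : sep.isPrefixOf (c :: rest)
      · simp only [h, if_true]
        rw [ih _ [] (cur.reverse :: acc), ih _ [] [cur.reverse]]
        simp
      · simp only [h, Bool.false_eq_true, if_false]
        exact ih rest (c :: cur) acc

theorem go_fuel (sep : List Char) (hsep : sep ≠ []) :
    ∀ (n fuel₁ fuel₂ : Nat) (l cur : List Char) (acc : List (List Char)),
      l.length ≤ n → l.length < fuel₁ → l.length < fuel₂ →
      PySem.Chars.splitOn.go sep fuel₁ l cur acc = PySem.Chars.splitOn.go sep fuel₂ l cur acc := by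
  intro n
  induction n with
  | zero =>
    intro fuel₁ fuel₂ l cur acc hl h1 h2
    have : l = [] := List.eq_nil_of_length_eq_zero (Nat.le_zero.mp hl)
    subst this
    obtain ⟨f1, rfl⟩ := Nat.exists_eq_succ_of_ne_zero (Nat.pos_iff_ne_zero.mp h1)
    obtain ⟨f2, rfl⟩ := Nat.exists_eq_succ_of_ne_zero (Nat.pos_iff_ne_zero.mp h2)
    simp [PySem.Chars.splitOn.go]
  | succ m ih =>
    intro fuel₁ fuel₂ l cur acc hl h1 h2
    obtain ⟨f1, rfl⟩ := Nat.exists_eq_succ_of_ne_zero (show fuel₁ ≠ 0 by omega)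
    obtain ⟨f2, rfl⟩ := Nat.exists_eq_succ_of_ne_zero (show fuel₂ ≠ 0 by omega)
    match l with
    | [] => simp [go_nil]
    | c :: rest =>
      rw [go_step, go_step]
      by_cases h : sep.isPrefixOf (c :: rest)
      · simp only [h, if_true]
        have hlen : sep.length ≤ (c :: rest).length := List.IsPrefix.length_le (List.isPrefixOf_iff_prefix.mp h)
        have hsl : 1 ≤ sep.length := by
          cases sep with
          | nil => exact absurd rfl hsep
          | cons _ _ => simp
        apply ih
        · simp only [List.length_drop]; simp at hl ⊢; omega
        · simp only [List.length_drop]; simp at h1 ⊢; omega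
        · simp only [List.length_drop]; simp at h2 ⊢; omega
      · simp only [h, Bool.false_eq_true, if_false]
        apply ih
        · simp at hl ⊢; omega
        · simp at h1 ⊢; omega
        · simp at h2 ⊢; omega

theorem splitOn_eq_split2 (a b : Char) :
    ∀ (n : Nat) (l cur : List Char), l.length ≤ n →
      PySem.Chars.splitOn.go [a, b] (l.length + 1) l cur []
        = (cur.reverse ++ (split2 a b l).1) :: (split2 a b l).2 := by
  intro n
  induction n with
  | zero =>
    intro l cur hl
    have : l = [] := List.eq_nil_of_length_eq_zero (Nat.le_zero.mp hl)
    subst this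
    simp [go_nil, split2]
  | succ m ih =>
    intro l cur hl
    match l with
    | [] => simp [go_nil, split2]
    | [x] =>
      have hpre : List.isPrefixOf [a, b] [x] = false := by simp [List.isPrefixOf]
      simp only [List.length_cons, List.length_nil]
      rw [go_step]
      simp only [hpre, Bool.false_eq_true, if_false]
      simp [go_nil, split2]
    | x :: y :: rest =>
      simp only [List.length_cons]
      rw [go_step]
      by_cases h : x = a ∧ y = b
      · obtain ⟨rfl, rfl⟩ := h
        have hpre : List.isPrefixOf [x, y] (x :: y :: rest) = true := by
          simp [List.isPrefixOf]
        simp only [hpre, if_true]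
        rw [go_acc]
        simp only [List.length_cons, List.length_nil, List.drop_succ_cons, List.drop_zero]
        rw [go_fuel [x, y] (by simp) m (rest.length + 1 + 1) (rest.length + 1) rest [] []
          (by simp at hl; omega) (by omega) (by omega)]
        rw [ih rest [] (by simp at hl; omega)]
        simp [split2]
      · have hpre : List.isPrefixOf [a, b] (x :: y :: rest) = false := by
          simp [List.isPrefixOf]
          intro h1 h2
          exact absurd ⟨h1.symm, h2.symm⟩ h
        simp only [hpre, Bool.false_eq_true, if_false]
        have h2 := ih (y :: rest) (x :: cur) (by simp at hl ⊢; omega)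
        simp only [List.length_cons] at h2 ⊢
        rw [h2]
        simp [split2, h]

theorem splitOn_split2 (a b : Char) (l : List Char) :
    PySem.Chars.splitOn l [a, b] = ((split2 a b l).1) :: (split2 a b l).2 := by
  have := splitOn_eq_split2 a b l.length l [] (le_refl _)
  simpa [PySem.Chars.splitOn] using this

theorem splitOn_eq_split1 (a : Char) :
    ∀ (l cur : List Char),
      PySem.Chars.splitOn.go [a] (l.length + 1) l cur []
        = (cur.reverse ++ (split1 a l).1) :: (split1 a l).2 := by
  intro l
  induction l with
  | nil => intro cur; simp [go_nil, split1]
  | cons x rest ih =>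
    intro cur
    simp only [List.length_cons]
    rw [go_step]
    by_cases h : x = a
    · subst h
      have hpre : List.isPrefixOf [x] (x :: rest) = true := by simp [List.isPrefixOf]
      simp only [hpre, if_true]
      rw [go_acc]
      simp only [List.length_cons, List.length_nil, List.drop_succ_cons, List.drop_zero]
      rw [ih []]
      simp [split1]
    · have hpre : List.isPrefixOf [a] (x :: rest) = false := by
        simp [List.isPrefixOf]
        intro h1; exact absurd h1.symm h
      simp only [hpre, Bool.false_eq_true, if_false]
      rw [ih (x :: cur)]
      simp [split1, h]

theorem splitOn_split1 (a : Char) (l : List Char) :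
    PySem.Chars.splitOn l [a] = ((split1 a l).1) :: (split1 a l).2 := by
  have := splitOn_eq_split1 a l []
  simpa [PySem.Chars.splitOn] using this

-- ===== B rewritten through the structural splitters =====

def chunkS (st : List Char × List String) (chunk : List Char) : List Char × List String :=
  (split1 ',' chunk).2.foldl (fun st part => (part, pvFlush st.1 st.2)) (st.1 ++ (split1 ',' chunk).1, st.2)

def pieceS (insideFirst : Bool) (st : List Char × List String) (piece : List Char) : List Char × List String :=
  (split2 ']' ']' piece).2.foldl chunkS (if insideFirst then (st.1 ++ (split2 ']' ']' piece).1, st.2) else chunkS st (split2 ']' ']' piece).1)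

def runRestB (inside : Bool) (cs : List Char) (st : List Char × List String) : List Char × List String :=
  (split2 '[' '[' cs).2.foldl (pieceS true) (pieceS inside st (split2 '[' '[' cs).1)

theorem pvDoChunk_eq (st : List Char × List String) (chunk : List Char) :
    pvDoChunk st chunk = chunkS st chunk := by
  simp [pvDoChunk, chunkS, splitOn_split1]

theorem pvDoChunk_fun : pvDoChunk = chunkS := by
  funext st chunk; exact pvDoChunk_eq st chunk

theorem pvDoPiece_eq (ins : Bool) (st : List Char × List String) (piece : List Char) :
    pvDoPiece ins st piece = pieceS ins st piece := by
  simp [pvDoPiece, pieceS, splitOn_split2, pvDoChunk_fun]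

theorem alt_eq_runB (aliases : String) :
    process_aliases_alt aliases
      = pvFlush (runRestB false (PySem.Str.strip aliases).toList ([], [])).1 (runRestB false (PySem.Str.strip aliases).toList ([], [])).2 := by
  have hfun : pvDoPiece true = pieceS true := by funext st p; exact pvDoPiece_eq true st p
  simp [process_aliases_alt, runRestB, splitOn_split2, pvDoPiece_eq, hfun]

-- ===== step lemmas for the token walk =====

theorem chunkS_nil (st : List Char × List String) : chunkS st [] = st := by
  simp [chunkS, split1]

theorem chunkS_cons_ne (c : Char) (hc : c ≠ ',') (st : List Char × List String) (ch : List Char) :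
    chunkS st (c :: ch) = chunkS (st.1 ++ [c], st.2) ch := by
  simp [chunkS, split1_cons_ne ',' c ch hc]

theorem chunkS_comma (st : List Char × List String) (ch : List Char) :
    chunkS st (',' :: ch) = chunkS ([], pvFlush st.1 st.2) ch := by
  simp only [chunkS, split1]
  simp

theorem pieceS_nil (ins : Bool) (st : List Char × List String) : pieceS ins st [] = st := by
  cases ins <;> simp [pieceS, split2, chunkS_nil]

theorem pieceS_close (ins : Bool) (st : List Char × List String) (p : List Char) :
    pieceS ins st (']' :: ']' :: p) = pieceS false st p := by
  simp only [pieceS, split2_cons_pair]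
  cases ins <;> simp [chunkS_nil]

theorem pieceS_cons_true (c : Char) (p : List Char) (hc : c = ']' → p.head? ≠ some ']')
    (st : List Char × List String) :
    pieceS true st (c :: p) = pieceS true (st.1 ++ [c], st.2) p := by
  simp [pieceS, split2_cons ']' ']' c p hc]

theorem pieceS_cons_false (c : Char) (p : List Char) (hc : c = ']' → p.head? ≠ some ']')
    (hcomma : c ≠ ',') (st : List Char × List String) :
    pieceS false st (c :: p) = pieceS false (st.1 ++ [c], st.2) p := by
  simp [pieceS, split2_cons ']' ']' c p hc, chunkS_cons_ne c hcomma]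

theorem pieceS_comma (p : List Char) (st : List Char × List String) :
    pieceS false st (',' :: p) = pieceS false ([], pvFlush st.1 st.2) p := by
  have hc : (',' : Char) = ']' → p.head? ≠ some ']' := by intro h; exact absurd h (by decide)
  simp [pieceS, split2_cons ']' ']' ',' p hc, chunkS_comma]

theorem runRestB_nil (inside : Bool) (st : List Char × List String) : runRestB inside [] st = st := by
  simp [runRestB, split2, pieceS_nil]

theorem runRestB_open (inside : Bool) (rest : List Char) (st : List Char × List String) :
    runRestB inside ('[' :: '[' :: rest) st = runRestB true rest st := by
  simp [runRestB, split2_cons_pair, pieceS_nil]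

theorem runRestB_close (inside : Bool) (rest : List Char) (st : List Char × List String) :
    runRestB inside (']' :: ']' :: rest) st = runRestB false rest st := by
  have h1 : (']' : Char) = '[' → (']' :: rest).head? ≠ some '[' := by intro h; exact absurd h (by decide)
  have h2 : (']' : Char) = '[' → rest.head? ≠ some '[' := by intro h; exact absurd h (by decide)
  simp [runRestB, split2_cons '[' '[' ']' _ h1, split2_cons '[' '[' ']' _ h2, pieceS_close]

theorem runRestB_comma (rest : List Char) (st : List Char × List String) :
    runRestB false (',' :: rest) st = runRestB false rest ([], pvFlush st.1 st.2) := by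
  have h1 : (',' : Char) = '[' → rest.head? ≠ some '[' := by intro h; exact absurd h (by decide)
  simp [runRestB, split2_cons '[' '[' ',' _ h1, pieceS_comma]

theorem runRestB_char (inside : Bool) (c : Char) (rest : List Char) (st : List Char × List String)
    (hoo : c = '[' → rest.head? ≠ some '[') (hcc : c = ']' → rest.head? ≠ some ']')
    (hcm : c = ',' → inside = true) :
    runRestB inside (c :: rest) st = runRestB inside rest (st.1 ++ [c], st.2) := by
  have hhd : c = ']' → ((split2 '[' '[' rest).1).head? ≠ some ']' := by
    intro hc
    rcases split2_fst_head '[' '[' rest with h | h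
    · simp [h]
    · rw [h]; exact hcc hc
  cases inside with
  | true => simp [runRestB, split2_cons '[' '[' c _ hoo, pieceS_cons_true c _ hhd]
  | false =>
    have hcomma : c ≠ ',' := by intro h; exact absurd (hcm h) (by simp)
    simp [runRestB, split2_cons '[' '[' c _ hoo, pieceS_cons_false c _ hhd hcomma]

-- ===== main invariant: A's state machine = B's token walk =====

theorem main_inv : ∀ (cs cur : List Char) (inside : Bool) (out : List String),
    stepA cs cur inside out = pvFlush (runRestB inside cs (cur, out)).1 (runRestB inside cs (cur, out)).2 := by
  intro cs cur inside out
  fun_induction stepA cs cur inside out with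
  | case1 rest cur inside out ih => rw [runRestB_open]; exact ih
  | case2 rest cur inside out ih => rw [runRestB_close]; exact ih
  | case3 rest cur out ih => rw [runRestB_comma]; exact ih
  | case4 c rest cur inside out h1 h2 h3 ih =>
    rw [runRestB_char inside c rest (cur, out)
      (by intro hc hh; cases rest with
          | nil => simp at hh
          | cons y r => simp at hh; exact h1 r hc (by rw [hh])
      )
      (by intro hc hh; cases rest with
          | nil => simp at hh
          | cons y r => simp at hh; exact h2 r hc (by rw [hh])
      )
      (by intro hc; cases inside with
          | true => rfl
          | false => exact absurd hc (fun hc => h3 rfl hc)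
      )]
    exact ih
  | case5 cur inside out => rw [runRestB_nil]

-- ===== VERDICT (by name: the statement is the Claim_ definition above) =====
theorem process_aliases_spec : Claim_equal_process_aliases := by
  intro aliases _
  unfold Spec_process_aliases
  rw [alt_eq_runB]
  unfold process_aliases
  by_cases h : (PySem.Str.strip aliases).toList = []
  · rw [h]; simp [runRestB_nil, pvFlush, PySem.Chars.strip, PySem.Chars.lstrip, PySem.Chars.rstrip, PySem.Chars.lower]
  · simp only [h, if_false]
    exact main_inv _ [] false []
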